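-- pv_equiv track=rewrite | github.com/cordell-charles/Battleships | battleships.py | is_open_sea
-- ===== SOURCE A (Python) =====
-- def is_adjacent(sr, sc, row, column):
--     """
--     New function added as an extension/helper to is_open_sea function.
--     Each sr and sc consists of ship row and column, this ship row and column is compared with the row and column
--     to check if the given coordinates are adjacent at any point. This function is used in a loop during is_open_sea function so check
--     if the occupied squares of a ship are adjacent.
--     """
--
--     if (sr,sc) == (row+1, column):
--         return True
--     elif (sr,sc) == (row, column-1):
--         return True
--     elif (sr,sc) == (row, column+1):
--         return True
--     elif (sr,sc) == (row-1, column):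
--         return True
--     elif (sr,sc) == (row+1, column-1):
--         return True
--     elif (sr,sc) == (row-1, column-1):
--         return True
--     elif (sr,sc) == (row-1, column+1):
--         return True
--     elif (sr,sc) == (row+1, column+1):
--         return True
--     else:
--        return False
--
-- def is_open_sea(row, column, fleet):
--     """
--     checks if the square given by row and column neither contains nor is adjacent (horizontally, vertically, or diagonally)
--     to some ship in fleet. Returns Boolean True if so and False otherwise
--     """
--     open_count = 0
--
--     for ship in fleet:
--         horizontal = ship[2]
--         length = ship[3]
--         if length == 1:
--             if is_adjacent(ship[0], ship[1], row, column):
--                 return False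
--             else:
--                 open_count += 1
--         else:
--             if horizontal == True:
--                 for i in range(ship[1], (ship[1]+length)): # Iterating through coordinates within the ship. column is changed if horizontal == False, row otherwise.
--                     if is_adjacent(ship[0], i, row, column): # If any of the occupied coordinates are adjacent with given row and column, return false
--                         return False
--                 else:
--                     open_count += 1
--
--             elif horizontal == False:
--                 for j in range(ship[0], (ship[0]+length)):
--                     if is_adjacent(j, ship[1], row, column):
--                         return False
--                 else:
--                     open_count += 1
--
--     # confirmation of each ship passes the open sea function, if the count is equal to the len of the fleet (each ship instance), then we can confirm and mark as true.
--     if open_count == len(fleet):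
--         return True
-- ===== SOURCE B (Python) =====
-- def is_open_sea(row, column, fleet):
--     # Per ship: O(1) interval-intersection test of the ship's segment with the
--     # 3x3 neighborhood of (row, column), excluding the center cell itself.
--     for sr, sc, horizontal, length in fleet:
--         if horizontal or length == 1:
--             rlo, rhi, clo, chi = sr, sr, sc, sc + length - 1
--         else:
--             rlo, rhi, clo, chi = sr, sr + length - 1, sc, sc
--         lor, hir = max(rlo, row - 1), min(rhi, row + 1)
--         loc, hic = max(clo, column - 1), min(chi, column + 1)
--         if lor <= hir and loc <= hic:
--             center = 1 if (lor <= row <= hir and loc <= column <= hic) else 0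
--             if (hir - lor + 1) * (hic - loc + 1) > center:
--                 return False
--     return True
-- ===== Notes on version B (the rewrite author's own statement) =====
-- stated objective: faster
-- what changed: Replaces the per-cell scan over every occupied square of each ship with an O(1) interval-intersection test of the ship's segment against the 3x3 neighborhood of the target cell (subtracting the center cell), so the cost per ship no longer depends on the ship's length.
import Mathlib
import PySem

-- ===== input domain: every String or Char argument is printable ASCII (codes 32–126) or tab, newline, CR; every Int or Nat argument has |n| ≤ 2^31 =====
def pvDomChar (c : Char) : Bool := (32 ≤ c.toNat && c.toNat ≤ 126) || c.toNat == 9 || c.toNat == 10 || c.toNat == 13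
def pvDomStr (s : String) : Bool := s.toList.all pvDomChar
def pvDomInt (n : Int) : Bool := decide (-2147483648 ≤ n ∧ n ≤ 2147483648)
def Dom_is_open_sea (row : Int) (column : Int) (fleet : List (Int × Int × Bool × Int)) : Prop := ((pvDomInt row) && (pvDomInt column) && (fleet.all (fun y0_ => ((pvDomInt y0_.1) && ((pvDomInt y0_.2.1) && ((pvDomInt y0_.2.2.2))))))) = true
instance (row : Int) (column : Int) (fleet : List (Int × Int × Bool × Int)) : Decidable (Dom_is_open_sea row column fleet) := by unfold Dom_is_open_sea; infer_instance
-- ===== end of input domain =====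

-- B replaces A's per-cell scan over every occupied square of each ship by one interval-intersection test per ship (faster per ship).

-- ===== PORT A =====
-- helper is_adjacent: the chain of tuple comparisons, in A's order
def is_adjacent (sr : Int) (sc : Int) (row : Int) (column : Int) : Bool :=
  if sr = row + 1 ∧ sc = column then true
  else if sr = row ∧ sc = column - 1 then true
  else if sr = row ∧ sc = column + 1 then true
  else if sr = row - 1 ∧ sc = column then true
  else if sr = row + 1 ∧ sc = column - 1 then true
  else if sr = row - 1 ∧ sc = column - 1 then true
  else if sr = row - 1 ∧ sc = column + 1 then true
  else if sr = row + 1 ∧ sc = column + 1 then true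
  else false

-- the for-loop over fleet, carrying open_count; at the end Python returns True only if open_count == len(fleet) (else falls through to None)
def isOpenSeaLoop (row : Int) (column : Int) (n : Int) : List (Int × Int × Bool × Int) → Int → Option Bool
  | [], open_count => if open_count = n then some true else none
  | ship :: rest, open_count =>
    if ship.2.2.2 = 1 then
      if is_adjacent ship.1 ship.2.1 row column then some false
      else isOpenSeaLoop row column n rest (open_count + 1)
    else if ship.2.2.1 = true then
      if (PySem.List.pyRange ship.2.1 (ship.2.1 + ship.2.2.2) 1).any (fun i => is_adjacent ship.1 i row column) then some false
      else isOpenSeaLoop row column n rest (open_count + 1)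
    else  -- horizontal == False (the only remaining case for a Bool)
      if (PySem.List.pyRange ship.1 (ship.1 + ship.2.2.2) 1).any (fun j => is_adjacent j ship.2.1 row column) then some false
      else isOpenSeaLoop row column n rest (open_count + 1)

def is_open_sea (row : Int) (column : Int) (fleet : List (Int × Int × Bool × Int)) : Option Bool :=
  isOpenSeaLoop row column (fleet.length : Int) fleet 0

-- ===== PORT B =====
-- does the box [rlo,rhi]×[clo,chi] meet the 3x3 neighborhood of (row,column) in a cell other than (row,column) itself?
def boxHit (rlo rhi clo chi row column : Int) : Bool :=
  let lor := max rlo (row - 1)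
  let hir := min rhi (row + 1)
  let loc := max clo (column - 1)
  let hic := min chi (column + 1)
  if lor ≤ hir ∧ loc ≤ hic then
    let center : Int := if lor ≤ row ∧ row ≤ hir ∧ loc ≤ column ∧ column ≤ hic then 1 else 0
    decide ((hir - lor + 1) * (hic - loc + 1) > center)
  else false

def shipAdjacent (row column : Int) (ship : Int × Int × Bool × Int) : Bool :=
  if ship.2.2.1 || ship.2.2.2 == 1 then
    boxHit ship.1 ship.1 ship.2.1 (ship.2.1 + ship.2.2.2 - 1) row column
  else
    boxHit ship.1 (ship.1 + ship.2.2.2 - 1) ship.2.1 ship.2.1 row column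

def is_open_sea_alt (row : Int) (column : Int) (fleet : List (Int × Int × Bool × Int)) : Option Bool :=
  some (! fleet.any (shipAdjacent row column))

-- ===== PRECONDITION & SPEC =====
def Spec_is_open_sea (row : Int) (column : Int) (fleet : List (Int × Int × Bool × Int)) (out : Option Bool) : Prop := out = is_open_sea_alt row column fleet
instance (row : Int) (column : Int) (fleet : List (Int × Int × Bool × Int)) (out : Option Bool) : Decidable (Spec_is_open_sea row column fleet out) := by unfold Spec_is_open_sea; infer_instance

-- ===== CLAIM (what is proved, stated in full; the proofs are below) =====
def Claim_equal_is_open_sea : Prop := ∀ (row : Int) (column : Int) (fleet : List (Int × Int × Bool × Int)), Dom_is_open_sea row column fleet → Spec_is_open_sea row column fleet (is_open_sea row column fleet)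

-- ===== LEMMAS AND PROOFS =====

theorem is_adjacent_iff (sr sc row column : Int) :
    is_adjacent sr sc row column = true ↔
      (row - 1 ≤ sr ∧ sr ≤ row + 1 ∧ column - 1 ≤ sc ∧ sc ≤ column + 1 ∧ ¬(sr = row ∧ sc = column)) := by
  unfold is_adjacent
  split_ifs <;> simp_all <;> omega

theorem boxHit_horiz_iff (sr clo chi row column : Int) :
    boxHit sr sr clo chi row column = true ↔
      (row - 1 ≤ sr ∧ sr ≤ row + 1 ∧
        ∃ c, clo ≤ c ∧ c ≤ chi ∧ column - 1 ≤ c ∧ c ≤ column + 1 ∧ ¬(sr = row ∧ c = column)) := by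
  simp only [boxHit]
  split_ifs with h1 h2 <;>
    [skip; skip;
     (constructor
      · intro hf; exact absurd hf (by simp)
      · rintro ⟨hr1, hr2, c, hc1, hc2, hc3, hc4, hc5⟩; exfalso; omega)] <;>
  · rw [decide_eq_true_eq]
    have hfac : min sr (row + 1) - max sr (row - 1) + 1 = 1 := by omega
    rw [hfac, one_mul]
    constructor
    · intro hd
      refine ⟨by omega, by omega, ?_⟩
      by_cases hlt : max clo (column - 1) < column
      · exact ⟨max clo (column - 1), by omega⟩
      · exact ⟨min chi (column + 1), by omega⟩
    · rintro ⟨hr1, hr2, c, hc1, hc2, hc3, hc4, hc5⟩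
      omega

theorem boxHit_vert_iff (sc rlo rhi row column : Int) :
    boxHit rlo rhi sc sc row column = true ↔
      (column - 1 ≤ sc ∧ sc ≤ column + 1 ∧
        ∃ r, rlo ≤ r ∧ r ≤ rhi ∧ row - 1 ≤ r ∧ r ≤ row + 1 ∧ ¬(r = row ∧ sc = column)) := by
  simp only [boxHit]
  split_ifs with h1 h2 <;>
    [skip; skip;
     (constructor
      · intro hf; exact absurd hf (by simp)
      · rintro ⟨hc1, hc2, r, hr1, hr2, hr3, hr4, hr5⟩; exfalso; omega)] <;>
  · rw [decide_eq_true_eq]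
    have hfac : min sc (column + 1) - max sc (column - 1) + 1 = 1 := by omega
    rw [hfac, mul_one]
    constructor
    · intro hd
      refine ⟨by omega, by omega, ?_⟩
      by_cases hlt : max rlo (row - 1) < row
      · exact ⟨max rlo (row - 1), by omega⟩
      · exact ⟨min rhi (row + 1), by omega⟩
    · rintro ⟨hc1, hc2, r, hr1, hr2, hr3, hr4, hr5⟩
      omega

-- per-ship agreement, single-cell ship
theorem hit_single (sr sc row column : Int) :
    is_adjacent sr sc row column = boxHit sr sr sc sc row column := by
  rw [Bool.eq_iff_iff, is_adjacent_iff, boxHit_horiz_iff]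
  constructor
  · intro h; exact ⟨by omega, by omega, sc, by omega, by omega, by omega, by omega, by tauto⟩
  · rintro ⟨h1, h2, c, hc1, hc2, hc3, hc4, hc5⟩; omega

-- per-ship agreement, horizontal scan vs interval test
theorem hit_horiz (sr sc len row column : Int) :
    (PySem.List.pyRange sc (sc + len) 1).any (fun i => is_adjacent sr i row column)
      = boxHit sr sr sc (sc + len - 1) row column := by
  rw [Bool.eq_iff_iff, List.any_eq_true, boxHit_horiz_iff]
  constructor
  · rintro ⟨i, hmem, hp⟩
    rw [PySem.List.mem_pyRange_one] at hmem
    rw [is_adjacent_iff] at hp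
    exact ⟨by omega, by omega, i, by omega, by omega, by omega, by omega, hp.2.2.2.2⟩
  · rintro ⟨h1, h2, c, hc1, hc2, hc3, hc4, hc5⟩
    refine ⟨c, ?_, ?_⟩
    · rw [PySem.List.mem_pyRange_one]; omega
    · rw [is_adjacent_iff]; exact ⟨by omega, by omega, by omega, by omega, by tauto⟩

-- per-ship agreement, vertical scan vs interval test
theorem hit_vert (sr sc len row column : Int) :
    (PySem.List.pyRange sr (sr + len) 1).any (fun j => is_adjacent j sc row column)
      = boxHit sr (sr + len - 1) sc sc row column := by
  rw [Bool.eq_iff_iff, List.any_eq_true, boxHit_vert_iff]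
  constructor
  · rintro ⟨j, hmem, hp⟩
    rw [PySem.List.mem_pyRange_one] at hmem
    rw [is_adjacent_iff] at hp
    exact ⟨by omega, by omega, j, by omega, by omega, by omega, by omega, hp.2.2.2.2⟩
  · rintro ⟨h1, h2, r, hr1, hr2, hr3, hr4, hr5⟩
    refine ⟨r, ?_, ?_⟩
    · rw [PySem.List.mem_pyRange_one]; omega
    · rw [is_adjacent_iff]; exact ⟨by omega, by omega, by omega, by omega, by tauto⟩

theorem loop_eq (row column n : Int) :
    ∀ (rest : List (Int × Int × Bool × Int)) (cnt : Int), n = cnt + rest.length →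
      isOpenSeaLoop row column n rest cnt = some (! rest.any (shipAdjacent row column))
  | [], cnt, h => by
    simp only [isOpenSeaLoop, List.any_nil, Bool.not_false]
    rw [if_pos (by simpa using h.symm)]
  | ship :: rest, cnt, h => by
    obtain ⟨sr, sc, hb, len⟩ := ship
    have hrec := loop_eq row column n rest (cnt + 1)
      (by simp at h ⊢; omega)
    have hship : shipAdjacent row column (sr, sc, hb, len) =
        (if len = 1 then is_adjacent sr sc row column
         else if hb = true then
           (PySem.List.pyRange sc (sc + len) 1).any (fun i => is_adjacent sr i row column)
         else
           (PySem.List.pyRange sr (sr + len) 1).any (fun j => is_adjacent j sc row column)) := by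
      by_cases hl : len = 1
      · subst hl
        simp only [shipAdjacent, beq_self_eq_true, Bool.or_true, if_pos]
        have e : sc + (1 : Int) - 1 = sc := by ring
        rw [e, hit_single]
      · rw [if_neg hl]
        cases hb
        · have hc : ((false : Bool) || (len == (1 : Int))) = false := by
            simp [hl]
          simp only [shipAdjacent, hc, Bool.false_eq_true, if_false, hit_vert]
        · simp only [shipAdjacent, Bool.true_or, if_pos, hit_horiz]
    simp only [isOpenSeaLoop, List.any_cons]
    rw [hship]
    by_cases hl : len = 1
    · simp only [if_pos hl]
      cases hv : is_adjacent sr sc row column <;> first | simp [hrec] | simp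
    · simp only [if_neg hl]
      cases hb
      · simp only [Bool.false_eq_true, if_false]
        cases hv : (PySem.List.pyRange sr (sr + len) 1).any (fun j => is_adjacent j sc row column) <;>
          first | simp [hrec] | simp
      · simp only [if_true]
        cases hv : (PySem.List.pyRange sc (sc + len) 1).any (fun i => is_adjacent sr i row column) <;>
          first | simp [hrec] | simp

-- ===== VERDICT (by name: the statement is the Claim_ definition above) =====
theorem is_open_sea_spec : Claim_equal_is_open_sea := by
  intro row column fleet _
  unfold Spec_is_open_sea is_open_sea is_open_sea_alt
  exact loop_eq row column _ fleet 0 (by simp)
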